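-- pv_equiv track=rewrite | github.com/laxel/AdventOfCode | 2019/d04/d04.py | adjCond2
-- ===== SOURCE A (Python) =====
-- def adjCond2(inp):
-- 	last = None
-- 	sameInRow = 1
-- 	for c in inp:
-- 		if c == last:
-- 			sameInRow += 1
-- 		else:
-- 			if sameInRow == 2:
-- 				return True
-- 			sameInRow = 1
-- 		last = c
--
-- 	if sameInRow == 2: return True
-- 	return False
-- ===== SOURCE B (Python) =====
-- def adjCond2(inp):
--     n = len(inp)
--     for i in range(n - 1):
--         if inp[i] == inp[i + 1] and (i == 0 or inp[i - 1] != inp[i]) and (i + 2 == n or inp[i + 2] != inp[i]):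
--             return True
--     return False
-- ===== Notes on version B (the rewrite author's own statement) =====
-- stated objective: alternative
-- what changed: Replaces A's stateful single pass (last char + sameInRow counter threaded through the loop, with early return and a post-loop check) by a stateless scan that tests at each index the local window condition 'inp[i]==inp[i+1], left neighbour absent or different, right neighbour absent or different', i.e. an isolated adjacent pair.
import Mathlib
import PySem

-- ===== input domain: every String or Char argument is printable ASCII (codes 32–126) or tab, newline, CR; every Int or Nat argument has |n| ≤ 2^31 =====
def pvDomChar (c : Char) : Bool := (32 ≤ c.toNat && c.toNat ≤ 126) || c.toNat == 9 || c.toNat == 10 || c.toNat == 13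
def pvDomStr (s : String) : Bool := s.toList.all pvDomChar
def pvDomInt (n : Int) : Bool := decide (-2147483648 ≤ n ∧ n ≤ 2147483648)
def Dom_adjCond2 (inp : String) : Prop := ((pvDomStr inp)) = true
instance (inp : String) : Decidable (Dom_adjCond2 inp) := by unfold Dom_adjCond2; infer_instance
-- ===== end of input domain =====

-- B replaces A's stateful run-counter pass by a stateless per-index window test (alternative decomposition, same cost).

-- ===== PORT A =====
-- A's for-loop with state (last, sameInRow), early return when a run ends at length 2, then the post-loop check.
def adjCond2Loop (last : Option Char) (sameInRow : Int) : List Char → Bool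
  | [] => sameInRow == 2
  | c :: cs =>
    if some c == last then
      adjCond2Loop (some c) (sameInRow + 1) cs
    else
      if sameInRow == 2 then true
      else adjCond2Loop (some c) 1 cs

def adjCond2 (inp : String) : Bool := adjCond2Loop none 1 inp.toList

-- ===== PORT B =====
-- the loop-body predicate: inp[i]==inp[i+1], left neighbour absent or different, right neighbour absent or different.
-- All indices actually read are in range (short-circuit guards), so getD is exact for Python's inp[i].
def pvWindow (xs : List Char) (n : Nat) (i : Nat) : Bool :=
  xs.getD i 'a' == xs.getD (i + 1) 'a'
  && (i == 0 || xs.getD (i - 1) 'a' != xs.getD i 'a')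
  && (i + 2 == n || xs.getD (i + 2) 'a' != xs.getD i 'a')

-- for i in range(n-1): if <window>: return True / return False  ==  any over range(n-1)
def adjCond2_alt (inp : String) : Bool :=
  (List.range (inp.toList.length - 1)).any (pvWindow inp.toList inp.toList.length)

-- ===== PRECONDITION & SPEC =====
def Spec_adjCond2 (inp : String) (out : Bool) : Prop := out = adjCond2_alt inp
instance (inp : String) (out : Bool) : Decidable (Spec_adjCond2 inp out) := by unfold Spec_adjCond2; infer_instance

-- ===== CLAIM (what is proved, stated in full; the proofs are below) =====
def Claim_equal_adjCond2 : Prop := ∀ (inp : String), Dom_adjCond2 inp → Spec_adjCond2 inp (adjCond2 inp)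

-- ===== LEMMAS AND PROOFS =====

-- proof-side structural middleman: the window scan written as recursion on the list, carrying the previous char
def adjGo (p : Option Char) : List Char → Bool
  | a :: b :: t => ((a == b) && (p != some a) && (t.head? != some a)) || adjGo (some a) (b :: t)
  | _ => false

theorem adjGo_prev_irrel (c d : Char) (t : List Char) (h : c ≠ d) :
    adjGo (some c) (d :: t) = adjGo none (d :: t) := by
  have h1 : (some c != some d) = true := by simp [h]
  have h2 : ((none : Option Char) != some d) = true := by simp
  cases t with
  | nil => simp [adjGo]
  | cons e t' => simp only [adjGo, h1, h2]

-- A's loop states vs the window scan: s = 1 (fresh run), s = 2, s ≥ 3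
theorem loop_eq_adjGo (ys : List Char) : ∀ (c : Char),
    (adjCond2Loop (some c) 1 ys = adjGo none (c :: ys))
    ∧ (adjCond2Loop (some c) 2 ys = ((ys.head? != some c) || adjGo (some c) (c :: ys)))
    ∧ (∀ s : Int, 3 ≤ s → adjCond2Loop (some c) s ys = adjGo (some c) (c :: ys)) := by
  induction ys with
  | nil =>
    intro c
    refine ⟨by simp [adjCond2Loop, adjGo], by simp [adjCond2Loop, adjGo], ?_⟩
    intro s hs
    have hs2 : (s == 2) = false := by simp; omega
    simp [adjCond2Loop, adjGo, hs2]
  | cons d t ih =>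
    intro c
    by_cases h : d = c
    · subst h
      refine ⟨?_, ?_, ?_⟩
      · have e1 : adjCond2Loop (some d) 1 (d :: t) = adjCond2Loop (some d) 2 t := by
          simp [adjCond2Loop]
        rw [e1, (ih d).2.1]
        have hn : ((none : Option Char) != some d) = true := by simp
        simp [adjGo, hn]
      · have e2 : adjCond2Loop (some d) 2 (d :: t) = adjCond2Loop (some d) 3 t := by
          simp [adjCond2Loop]
        rw [e2, (ih d).2.2 3 (by omega)]
        simp [adjGo]
      · intro s hs
        have e3 : adjCond2Loop (some d) s (d :: t) = adjCond2Loop (some d) (s + 1) t := by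
          simp [adjCond2Loop]
        rw [e3, (ih d).2.2 (s + 1) (by omega)]
        simp [adjGo]
    · have hne : c ≠ d := Ne.symm h
      have hdc : (some d == some c) = false := by simp [h]
      have hcd : (c == d) = false := by simp [hne]
      refine ⟨?_, ?_, ?_⟩
      · have e1 : adjCond2Loop (some c) 1 (d :: t) = adjCond2Loop (some d) 1 t := by
          simp [adjCond2Loop, hdc]
        rw [e1, (ih d).1]
        simp [adjGo, hcd, adjGo_prev_irrel c d t hne]
      · have e2 : adjCond2Loop (some c) 2 (d :: t) = true := by
          simp [adjCond2Loop, hdc]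
        rw [e2]
        simp [h]
      · intro s hs
        have hs2 : (s == 2) = false := by simp; omega
        have e3 : adjCond2Loop (some c) s (d :: t) = adjCond2Loop (some d) 1 t := by
          simp [adjCond2Loop, hdc, hs2]
        rw [e3, (ih d).1]
        simp [adjGo, hcd, adjGo_prev_irrel c d t hne]

-- B's index scan vs the window scan: generalized over the start index j, prev = xs[j-1]
theorem rangeAny_eq_adjGo_gen (xs : List Char) :
    ∀ (ys : List Char) (j : Nat), xs.drop j = ys →
      (List.range' j (xs.length - 1 - j)).any (pvWindow xs xs.length)
        = adjGo (if j = 0 then none else some (xs.getD (j - 1) 'a')) ys := by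
  intro ys
  induction ys with
  | nil =>
    intro j hd
    have hle : xs.length ≤ j := List.drop_eq_nil_iff.mp hd
    have h0 : xs.length - 1 - j = 0 := by omega
    simp [h0, adjGo]
  | cons a t ih =>
    intro j hd
    have hj : xs[j]? = some a := by
      have h0 : (xs.drop j)[0]? = some a := by rw [hd]; rfl
      simpa using h0
    have hlen : xs.length - j = t.length + 1 := by
      have := congrArg List.length hd; simpa using this
    have g0 : xs.getD j 'a' = a := by simp [List.getD_eq_getElem?_getD, hj]
    cases t with
    | nil =>
      have h0 : xs.length - 1 - j = 0 := by simp at hlen; omega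
      simp [h0, adjGo]
    | cons b t' =>
      have hd' : xs.drop (j + 1) = b :: t' := by
        rw [← List.drop_drop, hd]; rfl
      have hj1 : xs[j + 1]? = some b := by
        have h0 : (xs.drop (j + 1))[0]? = some b := by rw [hd']; rfl
        simpa using h0
      have g1 : xs.getD (j + 1) 'a' = b := by simp [List.getD_eq_getElem?_getD, hj1]
      have hlen' : xs.length = j + 2 + t'.length := by simp at hlen; omega
      have hcnt : xs.length - 1 - j = (xs.length - 1 - (j + 1)) + 1 := by omega
      -- the left-neighbour test equals adjGo's prev test
      have hleft : ((j == 0) || (xs.getD (j - 1) 'a' != xs.getD j 'a'))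
          = ((if j = 0 then (none : Option Char) else some (xs.getD (j - 1) 'a')) != some a) := by
        by_cases h0 : j = 0
        · subst h0; simp
        · have hb : (j == 0) = false := by simp [h0]
          simp [hb, h0, List.getD_eq_getElem?_getD, hj, bne]
      -- the right-neighbour test equals adjGo's lookahead test
      have hright : ((j + 2 == xs.length) || (xs.getD (j + 2) 'a' != xs.getD j 'a'))
          = (t'.head? != some a) := by
        cases t' with
        | nil =>
          have hb : (j + 2 == xs.length) = true := by simp [hlen']
          simp [hb]
        | cons e t'' =>
          have hb : (j + 2 == xs.length) = false := by
            simp at hlen' ⊢; omega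
          have hd'' : xs.drop (j + 2) = e :: t'' := by
            have : xs.drop (j + 2) = List.drop 1 (xs.drop (j + 1)) := by
              rw [List.drop_drop]
            rw [this, hd']; rfl
          have hj2 : xs[j + 2]? = some e := by
            have h0 : (xs.drop (j + 2))[0]? = some e := by rw [hd'']; rfl
            simpa using h0
          have g2 : xs.getD (j + 2) 'a' = e := by simp [List.getD_eq_getElem?_getD, hj2]
          simp [hb, List.getD_eq_getElem?_getD, hj2, hj, bne]
      have hwin : pvWindow xs xs.length j
          = ((a == b)
              && ((if j = 0 then (none : Option Char) else some (xs.getD (j - 1) 'a')) != some a)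
              && (t'.head? != some a)) := by
        unfold pvWindow
        rw [hleft, hright, g0, g1]
      have hih := ih (j + 1) hd'
      have hprev : (if j + 1 = 0 then (none : Option Char) else some (xs.getD (j + 1 - 1) 'a'))
          = some a := by simp [List.getD_eq_getElem?_getD, hj]
      rw [hcnt, List.range'_succ, List.any_cons, hwin, hih, hprev]
      simp only [adjGo]

theorem alt_eq_adjGo (xs : List Char) :
    (List.range (xs.length - 1)).any (pvWindow xs xs.length) = adjGo none xs := by
  have h := rangeAny_eq_adjGo_gen xs xs 0 (by simp)
  simpa [List.range_eq_range'] using h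

-- ===== VERDICT (by name: the statement is the Claim_ definition above) =====
theorem adjCond2_spec : Claim_equal_adjCond2 := by
  intro inp _
  unfold Spec_adjCond2 adjCond2 adjCond2_alt
  rw [alt_eq_adjGo]
  cases h : inp.toList with
  | nil => simp [adjCond2Loop, adjGo]
  | cons c cs =>
    have e0 : adjCond2Loop none 1 (c :: cs) = adjCond2Loop (some c) 1 cs := by
      simp [adjCond2Loop]
    rw [e0, (loop_eq_adjGo cs c).1]
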